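-- pv_equiv track=rewrite | github.com/mateozorzi/TDA | _Resueltos/2024/2023-C2-1/minOperaciones.py | buscarOptimos
-- ===== SOURCE A (Python) =====
-- def buscarOptimos(k):
--     optimos = [0] * (k+1)
--     #casos base
--     optimos[0] = 0
--     optimos[1] = 1
--     optimos[2] = 2
--
--     #ec de recurrencia:
--     #opt[i] -> k//2 == 0 -> min(opt[i//2], opt[i-1]) + 1 #Multiplico por 2 o sumo 1
--            #-> k//2 != 0 -> opt[i-1] + 1 #Sumo 1
--
--     for i in range(3, len(optimos)):
--         if i % 2 == 0:
--             optimos[i] = min(optimos[i//2], optimos[i-1]) + 1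
--         else:
--             optimos[i] = optimos[i-1] + 1
--
--     return optimos
-- ===== SOURCE B (Python) =====
-- def buscarOptimos(k):
--     # Entry i >= 1 has the closed form bit_length(i) + popcount(i) - 1:
--     # double for every binary digit after the leading one, add 1 for every set bit.
--     return [0] + [i.bit_length() + bin(i).count('1') - 1 for i in range(1, k + 1)]
-- ===== Notes on version B (the rewrite author's own statement) =====
-- stated objective: alternative
-- what changed: Replaces the DP array with a recurrence on earlier cells by an independent per-index closed form (bit_length(i) + popcount(i) - 1), so no table of previous results is consulted.
import Mathlib
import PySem

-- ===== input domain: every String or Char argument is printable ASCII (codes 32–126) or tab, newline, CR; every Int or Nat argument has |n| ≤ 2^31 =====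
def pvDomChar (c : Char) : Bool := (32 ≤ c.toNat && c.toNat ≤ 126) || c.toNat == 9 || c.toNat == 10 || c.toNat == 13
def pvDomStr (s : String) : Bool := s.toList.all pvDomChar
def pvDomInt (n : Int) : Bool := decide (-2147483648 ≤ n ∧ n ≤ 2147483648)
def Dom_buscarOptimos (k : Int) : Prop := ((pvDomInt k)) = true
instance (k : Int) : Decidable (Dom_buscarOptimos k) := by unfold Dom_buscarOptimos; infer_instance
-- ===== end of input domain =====

-- B replaces A's DP recurrence by an independent per-index closed form (bit_length + popcount - 1); alternative algorithm, same output.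

-- ===== PORT A =====
def buscarOptimos (k : Int) : List Int :=
  -- optimos = [0] * (k+1)  (Python: negative repetition gives []; toNat clamps the same way)
  let optimos : List Int := List.replicate (k + 1).toNat 0
  -- optimos[0] = 0; optimos[1] = 1; optimos[2] = 2  (in range under Pre_; Python raises IndexError for k < 2, excluded by Pre_)
  let optimos := ((optimos.set 0 0).set 1 1).set 2 2
  -- for i in range(3, len(optimos)): …
  (PySem.List.pyRange 3 (optimos.length : Int) 1).foldl
    (fun st i =>
      if PySem.Int.mod i 2 = 0 then
        PySem.List.pySetD st i
          (min (PySem.List.pyGetD st (PySem.Int.floordiv i 2) 0) (PySem.List.pyGetD st (i - 1) 0) + 1)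
      else
        PySem.List.pySetD st i (PySem.List.pyGetD st (i - 1) 0 + 1))
    optimos

-- ===== PORT B =====
def buscarOptimos_alt (k : Int) : List Int :=
  -- [0] + [i.bit_length() + bin(i).count('1') - 1 for i in range(1, k+1)]
  -- bin(i).count('1') = popcount for the i ≥ 1 produced by the range; PySem.Int.bitCount is exact there
  0 :: (PySem.List.pyRange 1 (k + 1) 1).map
    (fun i => (PySem.Int.bitLength i : Int) + (PySem.Int.bitCount i : Int) - 1)

-- ===== PRECONDITION & SPEC =====
-- Pre_ excludes exactly k < 2, on which Python A raises IndexError at the base-case assignments.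
def Pre_buscarOptimos (k : Int) : Prop := 2 ≤ k
instance (k : Int) : Decidable (Pre_buscarOptimos k) := by unfold Pre_buscarOptimos; infer_instance
def pvWitness_buscarOptimos : Int := (5)

def Spec_buscarOptimos (k : Int) (out : List Int) : Prop := out = buscarOptimos_alt k
instance (k : Int) (out : List Int) : Decidable (Spec_buscarOptimos k out) := by unfold Spec_buscarOptimos; infer_instance

-- ===== CLAIM (what is proved, stated in full; the proofs are below) =====
def Claim_equal_buscarOptimos : Prop := ∀ (k : Int), Dom_buscarOptimos k → Pre_buscarOptimos k → Spec_buscarOptimos k (buscarOptimos k)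

-- ===== LEMMAS AND PROOFS =====

-- closed form, indexed by a Nat
def pvT (m : Nat) : Int := (PySem.Int.bitLength (m : Int) : Int) + (PySem.Int.bitCount (m : Int) : Int) - 1

-- the value A writes at / leaves in index j of the finished array
def pvF (j : Nat) : Int := if j = 0 then 0 else pvT j

lemma pvF_pos (j : Nat) (h : j ≠ 0) : pvF j = pvT j := if_neg h

lemma pvT_even (a : Nat) (ha : 1 ≤ a) : pvT (2 * a) = pvT a + 1 := by
  unfold pvT
  rw [PySem.Int.bitLength_natCast (m := 2 * a) (by omega),
      PySem.Int.bitCount_natCast (m := 2 * a) (by omega)]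
  have h1 : 2 * a / 2 = a := by omega
  have h2 : 2 * a % 2 = 0 := by omega
  rw [h1, h2]
  push_cast
  ring

lemma pvT_odd (a : Nat) (ha : 1 ≤ a) : pvT (2 * a + 1) = pvT (2 * a) + 1 := by
  unfold pvT
  rw [PySem.Int.bitLength_natCast (m := 2 * a + 1) (by omega),
      PySem.Int.bitCount_natCast (m := 2 * a + 1) (by omega),
      PySem.Int.bitLength_natCast (m := 2 * a) (by omega),
      PySem.Int.bitCount_natCast (m := 2 * a) (by omega)]
  have h1 : (2 * a + 1) / 2 = a := by omega
  have h2 : 2 * a / 2 = a := by omega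
  have h3 : (2 * a + 1) % 2 = 1 := by omega
  have h4 : 2 * a % 2 = 0 := by omega
  rw [h1, h2, h3, h4]
  push_cast
  ring

lemma pvT_succ_le (m : Nat) (hm : 1 ≤ m) : pvT (m + 1) ≤ pvT m + 1 := by
  induction m using Nat.strong_induction_on with
  | _ m ih =>
    rcases Nat.even_or_odd (m + 1) with ⟨a, ha⟩ | ⟨a, ha⟩
    · -- m + 1 = 2a even
      have ha' : m + 1 = 2 * a := by omega
      by_cases h1 : a = 1
      · subst h1
        have : m = 1 := by omega
        subst this
        decide
      · have ha2 : 2 ≤ a := by omega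
        have hm' : m = 2 * (a - 1) + 1 := by omega
        have e1 : pvT (m + 1) = pvT a + 1 := by rw [ha']; exact pvT_even a (by omega)
        have e2 : pvT m = pvT (a - 1) + 2 := by
          rw [hm', pvT_odd (a - 1) (by omega), pvT_even (a - 1) (by omega)]; ring
        have e3 : pvT a ≤ pvT (a - 1) + 1 := by
          have h := ih (a - 1) (by omega) (by omega)
          have heq : a - 1 + 1 = a := by omega
          rwa [heq] at h
        linarith
    · -- m + 1 = 2a + 1 odd
      have ha' : m + 1 = 2 * a + 1 := by omega
      have ha1 : 1 ≤ a := by omega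
      have e1 : pvT (m + 1) = pvT (2 * a) + 1 := by rw [ha']; exact pvT_odd a ha1
      have hm' : m = 2 * a := by omega
      rw [e1, hm']

lemma pvF_even (m : Nat) (_hm : 3 ≤ m) (hpar : m % 2 = 0) :
    min (pvF (m / 2)) (pvF (m - 1)) + 1 = pvF m := by
  have ha2 : 2 ≤ m / 2 := by omega
  rw [pvF_pos (m / 2) (by omega), pvF_pos (m - 1) (by omega), pvF_pos m (by omega)]
  set a := m / 2 with hadef
  have ha' : m = 2 * a := by omega
  have hsub : m - 1 = 2 * (a - 1) + 1 := by omega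
  have e2 : pvT (m - 1) = pvT (a - 1) + 2 := by
    rw [hsub, pvT_odd (a - 1) (by omega), pvT_even (a - 1) (by omega)]; ring
  have e3 : pvT a ≤ pvT (a - 1) + 1 := by
    have h := pvT_succ_le (a - 1) (by omega)
    have heq : a - 1 + 1 = a := by omega
    rwa [heq] at h
  have hmin : min (pvT a) (pvT (m - 1)) = pvT a := by
    apply min_eq_left; linarith
  rw [hmin, ha', pvT_even a (by omega)]

lemma pvF_odd (m : Nat) (_hm : 3 ≤ m) (hpar : m % 2 = 1) :
    pvF (m - 1) + 1 = pvF m := by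
  rw [pvF_pos (m - 1) (by omega), pvF_pos m (by omega)]
  set a := m / 2 with hadef
  have ha' : m = 2 * a + 1 := by omega
  have hsub : m - 1 = 2 * a := by omega
  rw [ha', Nat.add_sub_cancel, pvT_odd a (by omega)]

lemma set_map_range (n m : Nat) (f : Nat → Int) (v : Int) (hm : m < n) :
    ((List.range n).map f).set m v = (List.range n).map (fun j => if j = m then v else f j) := by
  apply List.ext_getElem
  · simp
  · intro i h1 h2
    simp only [List.getElem_set, List.getElem_map, List.getElem_range] at *
    split_ifs with h3 h4 h4
    · rfl
    · omega
    · omega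
    · rfl

lemma getD_map_range (n m : Nat) (f : Nat → Int) (d : Int) (hm : m < n) :
    ((List.range n).map f).getD m d = f m := by
  rw [List.getD_eq_getElem?_getD]
  simp [hm]

-- the initial array [0,1,2,0,0,…] as a map over range
lemma init_eq (n : Nat) (_hn : 3 ≤ n) :
    ((((List.replicate n (0 : Int)).set 0 0).set 1 1).set 2 2)
      = (List.range n).map (fun j => if j < 3 then pvF j else 0) := by
  apply List.ext_getElem
  · simp
  · intro i h1 h2
    simp only [List.getElem_set, List.getElem_replicate, List.getElem_map, List.getElem_range] at *
    rcases Nat.lt_or_ge i 3 with h | h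
    · interval_cases i <;> simp [pvF, pvT] <;> decide
    · rw [if_neg (by omega), if_neg (by omega), if_neg (by omega), if_neg (by omega)]

-- one step of A's loop body on the invariant state
lemma step_eq (n m : Nat) (hm3 : 3 ≤ m) (hmn : m < n) :
    (fun (st : List Int) (i : Int) =>
      if PySem.Int.mod i 2 = 0 then
        PySem.List.pySetD st i
          (min (PySem.List.pyGetD st (PySem.Int.floordiv i 2) 0) (PySem.List.pyGetD st (i - 1) 0) + 1)
      else
        PySem.List.pySetD st i (PySem.List.pyGetD st (i - 1) 0 + 1))
      ((List.range n).map (fun j => if j < m then pvF j else 0)) (m : Int)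
    = (List.range n).map (fun j => if j < m + 1 then pvF j else 0) := by
  have hmod : PySem.Int.mod (m : Int) 2 = ((m % 2 : Nat) : Int) := by
    exact_mod_cast PySem.Int.mod_natCast m 2
  have hdiv : PySem.Int.floordiv (m : Int) 2 = ((m / 2 : Nat) : Int) := by
    exact_mod_cast PySem.Int.floordiv_natCast m 2
  have hsub : ((m : Int) - 1) = ((m - 1 : Nat) : Int) := by omega
  have hget1 : PySem.List.pyGetD ((List.range n).map (fun j => if j < m then pvF j else 0)) ((m : Int) - 1) 0
      = pvF (m - 1) := by
    rw [hsub, PySem.List.pyGetD_natCast, getD_map_range n (m - 1) _ 0 (by omega), if_pos (by omega)]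
  have hget2 : PySem.List.pyGetD ((List.range n).map (fun j => if j < m then pvF j else 0)) (PySem.Int.floordiv (m : Int) 2) 0
      = pvF (m / 2) := by
    rw [hdiv, PySem.List.pyGetD_natCast, getD_map_range n (m / 2) _ 0 (by omega), if_pos (by omega)]
  have hstate : ∀ (v : Int), PySem.List.pySetD ((List.range n).map (fun j => if j < m then pvF j else 0)) (m : Int) v
      = (List.range n).map (fun j => if j = m then v else if j < m then pvF j else 0) := by
    intro v
    rw [PySem.List.pySetD_natCast, set_map_range n m _ v hmn]
  simp only [hmod, hget1, hget2, hstate]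
  rcases Nat.even_or_odd m with hpar | hpar
  · have h0 : m % 2 = 0 := Nat.even_iff.mp hpar
    have hF := pvF_even m hm3 h0
    rw [if_pos (by rw [h0]; norm_num)]
    apply List.map_congr_left
    intro j _
    by_cases hj : j = m
    · subst hj; rw [if_pos rfl, if_pos (by omega), hF]
    · rw [if_neg hj]
      by_cases hj2 : j < m
      · rw [if_pos hj2, if_pos (by omega)]
      · rw [if_neg hj2, if_neg (by omega)]
  · have h0 : m % 2 = 1 := Nat.odd_iff.mp hpar
    have hF := pvF_odd m hm3 h0
    rw [if_neg (by rw [h0]; norm_num)]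
    apply List.map_congr_left
    intro j _
    by_cases hj : j = m
    · subst hj; rw [if_pos rfl, if_pos (by omega), hF]
    · rw [if_neg hj]
      by_cases hj2 : j < m
      · rw [if_pos hj2, if_pos (by omega)]
      · rw [if_neg hj2, if_neg (by omega)]

lemma fold_inv (n : Nat) (_hn : 3 ≤ n) : ∀ (m : Nat), 3 ≤ m → m ≤ n →
    (PySem.List.pyRange 3 (m : Int) 1).foldl
      (fun st i =>
        if PySem.Int.mod i 2 = 0 then
          PySem.List.pySetD st i
            (min (PySem.List.pyGetD st (PySem.Int.floordiv i 2) 0) (PySem.List.pyGetD st (i - 1) 0) + 1)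
        else
          PySem.List.pySetD st i (PySem.List.pyGetD st (i - 1) 0 + 1))
      ((List.range n).map (fun j => if j < 3 then pvF j else 0))
    = (List.range n).map (fun j => if j < m then pvF j else 0) := by
  intro m
  induction m with
  | zero => omega
  | succ m ih =>
    intro hm3 hmn
    by_cases hm : m = 2
    · subst hm
      rw [show ((3 : Nat) : Int) = 3 by norm_num] at *
      rw [PySem.List.pyRange_one_eq_nil (by norm_num)]
      rfl
    · have hm3' : 3 ≤ m := by omega
      have hcast : ((m + 1 : Nat) : Int) = (m : Int) + 1 := by push_cast; ring
      rw [hcast, PySem.List.pyRange_one_succ_right (by exact_mod_cast hm3'), List.foldl_append]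
      rw [ih hm3' (by omega)]
      simp only [List.foldl_cons, List.foldl_nil]
      exact step_eq n m hm3' (by omega)

-- B's port as a map over range
lemma alt_eq (k : Int) (hk : 2 ≤ k) :
    buscarOptimos_alt k = (List.range (k + 1).toNat).map pvF := by
  unfold buscarOptimos_alt
  rw [PySem.List.pyRange_one]
  have h1 : ((k + 1) - 1).toNat = k.toNat := by omega
  have h2 : (k + 1).toNat = k.toNat + 1 := by omega
  rw [h1, h2, List.range_succ_eq_map, List.map_cons, List.map_map, List.map_map]
  refine congrArg₂ List.cons (by simp [pvF]) (List.map_congr_left ?_)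
  intro j _
  simp only [Function.comp_apply, Nat.succ_eq_add_one]
  rw [show (1 : Int) + (j : Int) = ((j + 1 : Nat) : Int) by push_cast; ring]
  rw [pvF_pos (j + 1) (by omega)]
  rfl

-- ===== VERDICT (by name: the statement is the Claim_ definition above) =====
theorem buscarOptimos_spec : Claim_equal_buscarOptimos := by
  intro k _ hk
  unfold Spec_buscarOptimos
  have hk2 : (2 : Int) ≤ k := hk
  have hred : buscarOptimos k =
      (PySem.List.pyRange 3 (((((List.replicate (k + 1).toNat (0 : Int)).set 0 0).set 1 1).set 2 2).length : Int) 1).foldl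
        (fun st i =>
          if PySem.Int.mod i 2 = 0 then
            PySem.List.pySetD st i
              (min (PySem.List.pyGetD st (PySem.Int.floordiv i 2) 0) (PySem.List.pyGetD st (i - 1) 0) + 1)
          else
            PySem.List.pySetD st i (PySem.List.pyGetD st (i - 1) 0 + 1))
        ((((List.replicate (k + 1).toNat (0 : Int)).set 0 0).set 1 1).set 2 2) := rfl
  rw [hred]
  set n : Nat := (k + 1).toNat with hn
  have hn3 : 3 ≤ n := by omega
  rw [init_eq n hn3]
  rw [show (((List.range n).map (fun j => if j < 3 then pvF j else 0)).length : Int) = (n : Int) by simp]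
  rw [fold_inv n hn3 n (by omega) (le_refl n)]
  rw [alt_eq k hk2]
  apply List.map_congr_left
  intro j hj
  rw [List.mem_range] at hj
  rw [if_pos hj]
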